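-- pv_equiv track=rewrite | github.com/ornni/programmers | 프로그래머스/2/77485. 행렬 테두리 회전하기/행렬 테두리 회전하기.py | solution
-- ===== SOURCE A (Python) =====
-- def move(data, x1, y1, x2, y2):
--     left = data[x1][y2]
--     right = data[x2][y1]
--     min_num = min(left, right)
--
--     for i in range(y2, y1, -1):
--         data[x1][i] = data[x1][i-1]
--         min_num = min(min_num, data[x1][i-1])
--
--     for i in range(y1, y2):
--         data[x2][i] = data[x2][i+1]
--         min_num = min(min_num, data[x2][i+1])
--
--     for i in range(x2, x1, -1):
--         data[i][y2] = data[i-1][y2]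
--         min_num = min(min_num, data[i-1][y2])
--
--     for i in range(x1, x2):
--         data[i][y1] = data[i+1][y1]
--         min_num = min(min_num, data[i+1][y1])
--
--     data[x2-1][y1] = right
--     data[x1+1][y2] = left
--
--     return data, min_num
--
-- def solution(rows, columns, queries):
--     answers = []
--     number = 1
--     numbers = [[0] * (columns + 1)]
--     for _ in range(rows):
--         row_add = [0]
--         for _ in range(columns):
--             row_add.append(number)
--             number += 1
--         numbers.append(row_add)
--
--     for i in queries:
--         numbers, answer = move(numbers, i[0], i[1], i[2], i[3])
--         answers.append(answer)
--
--     return answers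
-- ===== SOURCE B (Python) =====
-- def move(data, x1, y1, x2, y2):
--     def src(i, j):
--         if i == x1 and y1 < j <= y2:
--             return data[x1][j - 1]
--         if j == y2 and x1 < i <= x2:
--             return data[i - 1][y2]
--         if i == x2 and y1 <= j < y2:
--             return data[x2][j + 1]
--         if j == y1 and x1 <= i < x2:
--             return data[i + 1][y1]
--         return data[i][j]
--
--     border = ([data[x1][y] for y in range(y1, y2 + 1)]
--               + [data[x][y2] for x in range(x1 + 1, x2 + 1)]
--               + [data[x2][y] for y in range(y1, y2)]
--               + [data[x][y1] for x in range(x1 + 1, x2)])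
--     new = [[src(i, j) for j in range(len(row))] for i, row in enumerate(data)]
--     return new, min(border)
--
--
-- def solution(rows, columns, queries):
--     answers = []
--     numbers = [[0] * (columns + 1)] + [
--         [0] + [r * columns + c + 1 for c in range(columns)] for r in range(rows)
--     ]
--     for i in queries:
--         numbers, answer = move(numbers, i[0], i[1], i[2], i[3])
--         answers.append(answer)
--     return answers
-- ===== Notes on version B (the rewrite author's own statement) =====
-- stated objective: alternative
-- what changed: move() is rewritten functionally: instead of four in-place shifting loops with a running min, B rebuilds the matrix with a pure per-cell clockwise-predecessor rule and returns min() of the border values collected by one ring walk; the matrix itself is built by a closed-form comprehension instead of a running counter.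
-- outside the precondition, e.g. on solution(4, 4, [[2, 4, 3, 3]]): A returns [7], B returns [11]; on solution(2, 3, [[1, 3, 0, 0]]): A returns [0], B raises ValueError
import Mathlib
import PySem

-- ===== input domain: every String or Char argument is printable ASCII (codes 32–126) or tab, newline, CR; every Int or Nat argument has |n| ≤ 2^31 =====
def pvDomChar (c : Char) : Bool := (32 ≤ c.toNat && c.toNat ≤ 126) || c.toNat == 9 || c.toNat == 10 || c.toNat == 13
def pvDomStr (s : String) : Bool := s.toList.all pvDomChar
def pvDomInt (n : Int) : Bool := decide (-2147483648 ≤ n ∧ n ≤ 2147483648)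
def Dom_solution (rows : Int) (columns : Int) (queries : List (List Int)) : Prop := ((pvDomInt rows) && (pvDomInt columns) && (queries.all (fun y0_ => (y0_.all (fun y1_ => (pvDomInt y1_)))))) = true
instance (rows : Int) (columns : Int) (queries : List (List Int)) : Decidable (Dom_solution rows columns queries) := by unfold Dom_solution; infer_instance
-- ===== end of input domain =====

-- B rewrites move() functionally: a pure per-cell clockwise-predecessor rule rebuilds the matrix and min() of one
-- ring walk gives the answer, replacing A's four in-place shifting loops with a running min (return value only:
-- both Pythons mutate only a matrix local to solution(), callers observe nothing).

-- ===== PORT A =====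
-- data[i][j] read/write with Python index semantics (shared primitive wrapper used by both ports)
def get2 (d : List (List Int)) (i j : Int) : Int :=
  PySem.List.pyGetD (PySem.List.pyGetD d i []) j 0

def set2 (d : List (List Int)) (i j : Int) (v : Int) : List (List Int) :=
  PySem.List.pySetD d i (PySem.List.pySetD (PySem.List.pyGetD d i []) j v)

def moveA (data : List (List Int)) (x1 y1 x2 y2 : Int) : List (List Int) × Int :=
  let left := get2 data x1 y2
  let right := get2 data x2 y1
  let s1 := (PySem.List.pyRange y2 y1 (-1)).foldl
    (fun s i =>
      let d := set2 s.1 x1 i (get2 s.1 x1 (i - 1))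
      (d, min s.2 (get2 d x1 (i - 1)))) (data, min left right)
  let s2 := (PySem.List.pyRange y1 y2 1).foldl
    (fun s i =>
      let d := set2 s.1 x2 i (get2 s.1 x2 (i + 1))
      (d, min s.2 (get2 d x2 (i + 1)))) s1
  let s3 := (PySem.List.pyRange x2 x1 (-1)).foldl
    (fun s i =>
      let d := set2 s.1 i y2 (get2 s.1 (i - 1) y2)
      (d, min s.2 (get2 d (i - 1) y2))) s2
  let s4 := (PySem.List.pyRange x1 x2 1).foldl
    (fun s i =>
      let d := set2 s.1 i y1 (get2 s.1 (i + 1) y1)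
      (d, min s.2 (get2 d (i + 1) y1))) s3
  (set2 (set2 s4.1 (x2 - 1) y1 right) (x1 + 1) y2 left, s4.2)

def solution (rows : Int) (columns : Int) (queries : List (List Int)) : List Int :=
  (queries.foldl
    (fun s i =>
      let r := moveA s.1 (PySem.List.pyGetD i 0 0) (PySem.List.pyGetD i 1 0)
        (PySem.List.pyGetD i 2 0) (PySem.List.pyGetD i 3 0)
      (r.1, s.2 ++ [r.2]))
    (((PySem.List.pyRange 0 rows 1).foldl
        (fun s _ =>
          let inner := (PySem.List.pyRange 0 columns 1).foldl
            (fun t _ => (t.1 ++ [t.2], t.2 + 1)) (([0], s.1) : List Int × Int)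
          (inner.2, s.2 ++ [inner.1]))
        ((1, [PySem.List.pyRepeat [0] (columns + 1)]) : Int × List (List Int))).2,
     ([] : List Int))).2

-- ===== PORT B =====
def srcB (data : List (List Int)) (x1 y1 x2 y2 i j : Int) : Int :=
  if i = x1 ∧ y1 < j ∧ j ≤ y2 then get2 data x1 (j - 1)
  else if j = y2 ∧ x1 < i ∧ i ≤ x2 then get2 data (i - 1) y2
  else if i = x2 ∧ y1 ≤ j ∧ j < y2 then get2 data x2 (j + 1)
  else if j = y1 ∧ x1 ≤ i ∧ i < x2 then get2 data (i + 1) y1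
  else get2 data i j

def borderB (data : List (List Int)) (x1 y1 x2 y2 : Int) : List Int :=
  (PySem.List.pyRange y1 (y2 + 1) 1).map (fun y => get2 data x1 y)
    ++ (PySem.List.pyRange (x1 + 1) (x2 + 1) 1).map (fun x => get2 data x y2)
    ++ (PySem.List.pyRange y1 y2 1).map (fun y => get2 data x2 y)
    ++ (PySem.List.pyRange (x1 + 1) x2 1).map (fun x => get2 data x y1)

-- min(border): Python raises ValueError on an empty border (only outside Pre_); the port totalises with .getD 0 there
def moveB (data : List (List Int)) (x1 y1 x2 y2 : Int) : List (List Int) × Int :=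
  ((PySem.List.enumerate data).map (fun p =>
      (PySem.List.pyRange 0 (PySem.List.len p.2) 1).map (fun j => srcB data x1 y1 x2 y2 p.1 j)),
   (PySem.List.min? (borderB data x1 y1 x2 y2) (fun v => v)).getD 0)

def solution_alt (rows : Int) (columns : Int) (queries : List (List Int)) : List Int :=
  (queries.foldl
    (fun s i =>
      let r := moveB s.1 (PySem.List.pyGetD i 0 0) (PySem.List.pyGetD i 1 0)
        (PySem.List.pyGetD i 2 0) (PySem.List.pyGetD i 3 0)
      (r.1, s.2 ++ [r.2]))
    (PySem.List.pyRepeat [0] (columns + 1)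
       :: (PySem.List.pyRange 0 rows 1).map (fun r =>
            (0 : Int) :: (PySem.List.pyRange 0 columns 1).map (fun c => r * columns + c + 1)),
     ([] : List Int))).2

-- ===== PRECONDITION & SPEC =====
def okQuery (rows columns : Int) (q : List Int) : Bool :=
  decide (PySem.List.len q = 4
    ∧ 1 ≤ PySem.List.pyGetD q 0 0 ∧ PySem.List.pyGetD q 0 0 < PySem.List.pyGetD q 2 0
    ∧ PySem.List.pyGetD q 2 0 ≤ rows
    ∧ 1 ≤ PySem.List.pyGetD q 1 0 ∧ PySem.List.pyGetD q 1 0 < PySem.List.pyGetD q 3 0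
    ∧ PySem.List.pyGetD q 3 0 ≤ columns)

-- Pre_ keeps exactly the problem's contract (each query is [x1,y1,x2,y2] with 1 ≤ x1 < x2 ≤ rows, 1 ≤ y1 < y2 ≤ columns):
-- outside it A raises IndexError on most inputs, and on the remaining degenerate or reversed rectangles A's shifting loops
-- write the two corner values outside the ring — an accidental corner behaviour no caller is promised, where B's ring walk
-- naturally returns something else or raises ValueError on an empty border.
def Pre_solution (rows : Int) (columns : Int) (queries : List (List Int)) : Prop :=
  ∀ q ∈ queries, okQuery rows columns q = true
instance (rows : Int) (columns : Int) (queries : List (List Int)) : Decidable (Pre_solution rows columns queries) := by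
  unfold Pre_solution; infer_instance

def pvWitness_solution : Int × Int × List (List Int) := (2, 2, [[1, 1, 2, 2]])

def Spec_solution (rows : Int) (columns : Int) (queries : List (List Int)) (out : List Int) : Prop := out = solution_alt rows columns queries
instance (rows : Int) (columns : Int) (queries : List (List Int)) (out : List Int) : Decidable (Spec_solution rows columns queries out) := by unfold Spec_solution; infer_instance

-- ===== CLAIM (what is proved, stated in full; the proofs are below) =====
def Claim_equal_solution : Prop := ∀ (rows : Int) (columns : Int) (queries : List (List Int)), Dom_solution rows columns queries → Pre_solution rows columns queries → Spec_solution rows columns queries (solution rows columns queries)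

-- ===== LEMMAS AND PROOFS =====

theorem pyGetD_nn {α : Type} (xs : List α) (i : Int) (df : α) (h : 0 ≤ i) :
    PySem.List.pyGetD xs i df = (xs[i.toNat]?).getD df := by
  simp [PySem.List.pyGetD, PySem.List.pyGet?_of_nonneg _ h]

theorem get2_nn (d : List (List Int)) (i j : Int) (hi : 0 ≤ i) (hj : 0 ≤ j) :
    get2 d i j = (((d[i.toNat]?).getD [])[j.toNat]?).getD 0 := by
  simp [get2, pyGetD_nn _ _ _ hi, pyGetD_nn _ _ _ hj]

theorem get2_set2_ne (d : List (List Int)) (i j i' j' : Int) (v : Int)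
    (hne : i ≠ i' ∨ j ≠ j') (hi : 0 ≤ i) (hj : 0 ≤ j) (hi' : 0 ≤ i') (hj' : 0 ≤ j') :
    get2 (set2 d i j v) i' j' = get2 d i' j' := by
  unfold set2
  rw [PySem.List.pySetD_of_nonneg _ _ hi, get2_nn _ _ _ hi' hj', get2_nn _ _ _ hi' hj',
    List.getElem?_set]
  by_cases h2 : i.toNat = i'.toNat
  · have hii : i = i' := by omega
    have hj2 : j ≠ j' := hne.resolve_left (fun hc => hc hii)
    have hjj : j.toNat ≠ j'.toNat := by omega
    rw [if_pos h2]
    by_cases hlen : i.toNat < d.length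
    · rw [if_pos hlen, Option.getD_some, PySem.List.pySetD_of_nonneg _ _ hj,
        List.getElem?_set, if_neg hjj, hii, pyGetD_nn d i' [] hi']
    · rw [if_neg hlen, Option.getD_none,
        List.getElem?_eq_none (show d.length ≤ i'.toNat by omega)]
      simp
  · rw [if_neg h2]

theorem get2_set2_eq (d : List (List Int)) (i j : Int) (v : Int)
    (hi : 0 ≤ i) (hiR : i < (d.length : Int)) (hj : 0 ≤ j)
    (hjC : j < ((PySem.List.pyGetD d i []).length : Int)) :
    get2 (set2 d i j v) i j = v := by
  have hrow : j.toNat < (PySem.List.pyGetD d i []).length := by omega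
  unfold set2
  rw [PySem.List.pySetD_of_nonneg _ _ hi, get2_nn _ _ _ hi hj, List.getElem?_set,
    if_pos rfl, if_pos (by omega), Option.getD_some, PySem.List.pySetD_of_nonneg _ _ hj,
    List.getElem?_set, if_pos rfl, if_pos hrow, Option.getD_some]

theorem length_set2 (d : List (List Int)) (i j : Int) (v : Int) :
    (set2 d i j v).length = d.length := by
  unfold set2; exact PySem.List.length_pySetD _ _ _

theorem inRange_of_pyIdx?_some {n : Nat} {i : Int} {k : Nat}
    (h : PySem.List.pyIdx? n i = some k) : PySem.Raise.InRange n i := by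
  unfold PySem.List.pyIdx? at h
  constructor <;> (split_ifs at h <;> omega)

theorem rows_set2 {C : Nat} (d : List (List Int)) (i j : Int) (v : Int)
    (h : ∀ r ∈ d, r.length = C) : ∀ r ∈ set2 d i j v, r.length = C := by
  intro r hr
  unfold set2 at hr
  set nr := PySem.List.pySetD (PySem.List.pyGetD d i []) j v with hnr
  unfold PySem.List.pySetD PySem.List.pySet? at hr
  rcases hk : PySem.List.pyIdx? d.length i with _ | k
  · rw [hk] at hr; simp at hr; exact h r hr
  · rw [hk] at hr
    simp only [Option.map_some, Option.getD_some] at hr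
    rcases List.mem_or_eq_of_mem_set hr with h' | h'
    · exact h r h'
    · subst h'
      rw [hnr, PySem.List.length_pySetD]
      exact h _ (PySem.List.pyGetD_mem d [] (inRange_of_pyIdx?_some hk))

theorem rowlen_get2 {C : Nat} (d : List (List Int)) (i : Int)
    (h : ∀ r ∈ d, r.length = C) (hi : 0 ≤ i) (hiR : i < (d.length : Int)) :
    (PySem.List.pyGetD d i []).length = C := by
  rw [pyGetD_nn _ _ _ hi, List.getElem?_eq_getElem (by omega), Option.getD_some]
  exact h _ (List.getElem_mem _)
set_option maxHeartbeats 1000000 in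
theorem loopTop_char (x1 y1 : Int) {C : Nat} (n : Nat) :
    ∀ (d : List (List Int)) (m : Int) (res : List (List Int) × Int),
    res = (PySem.List.pyRange (y1 + n) y1 (-1)).foldl
        (fun s i =>
          let dd := set2 s.1 x1 i (get2 s.1 x1 (i - 1))
          (dd, min s.2 (get2 dd x1 (i - 1)))) (d, m) →
    (∀ r ∈ d, r.length = C) → 0 ≤ x1 → x1 < (d.length : Int) → 0 ≤ y1 → y1 + n < (C : Int) →
    res.1.length = d.length ∧ (∀ r ∈ res.1, r.length = C)
    ∧ (∀ i j : Int, 0 ≤ i → 0 ≤ j →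
        get2 res.1 i j = if i = x1 ∧ y1 < j ∧ j ≤ y1 + n then get2 d x1 (j - 1) else get2 d i j)
    ∧ res.2 ≤ m
    ∧ (∀ j : Int, y1 ≤ j → j < y1 + n → res.2 ≤ get2 d x1 j)
    ∧ (res.2 = m ∨ ∃ j : Int, y1 ≤ j ∧ j < y1 + n ∧ res.2 = get2 d x1 j) := by
  induction n with
  | zero =>
    intro d m res hres hrow hx hxR hy hyC
    rw [PySem.List.pyRange_neg_one_eq_nil (by omega), List.foldl_nil] at hres
    subst hres
    refine ⟨rfl, hrow, ?_, le_refl _, ?_, Or.inl rfl⟩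
    · intro i j hi hj
      rw [if_neg (by omega)]
    · intro j hj1 hj2; omega
  | succ n ih =>
    intro d m res hres hrow hx hxR hy hyC
    have e1 : y1 + (↑(n + 1) : Int) - 1 = y1 + ↑n := by push_cast; ring
    rw [PySem.List.pyRange_neg_one_cons (by omega), List.foldl_cons, e1] at hres
    set d1 := set2 d x1 (y1 + ↑(n + 1)) (get2 d x1 (y1 + ↑n)) with hd1
    set m1 := min m (get2 d1 x1 (y1 + ↑n)) with hm1
    have hres2 : res = (PySem.List.pyRange (y1 + ↑n) y1 (-1)).foldl
        (fun s i =>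
          let dd := set2 s.1 x1 i (get2 s.1 x1 (i - 1))
          (dd, min s.2 (get2 dd x1 (i - 1)))) (d1, m1) := hres
    have hlen1 : d1.length = d.length := length_set2 _ _ _ _
    have hrow1 : ∀ r ∈ d1, r.length = C := rows_set2 _ _ _ _ hrow
    have hread : get2 d1 x1 (y1 + ↑n) = get2 d x1 (y1 + ↑n) := by
      rw [hd1]; exact get2_set2_ne _ _ _ _ _ _ (Or.inr (by omega)) hx (by omega) hx (by omega)
    obtain ⟨L, RWS, PT, MLE, MB, MA⟩ :=
      ih d1 m1 res hres2 hrow1 hx (by omega) hy (by push_cast at hyC ⊢; omega)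
    have hm1' : m1 = min m (get2 d x1 (y1 + ↑n)) := by rw [hm1, hread]
    refine ⟨L.trans hlen1, RWS, ?_, ?_, ?_, ?_⟩
    · intro i j hi hj
      rw [PT i j hi hj]
      by_cases hc : i = x1 ∧ y1 < j ∧ j ≤ y1 + ↑n
      · rw [if_pos hc, if_pos (by push_cast at hc ⊢; omega)]
        rw [hd1]
        exact get2_set2_ne _ _ _ _ _ _ (Or.inr (by omega)) hx (by omega) hx (by omega)
      · rw [if_neg hc]
        by_cases hc2 : i = x1 ∧ j = y1 + ↑(n + 1)
        · rw [if_pos (by push_cast at hc2 ⊢; omega)]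
          obtain ⟨hcx, hcy⟩ := hc2
          subst hcx
          rw [hcy, hd1]
          rw [show y1 + (↑(n + 1) : Int) - 1 = y1 + ↑n from e1]
          have hrl := rowlen_get2 d i hrow hx hxR
          exact get2_set2_eq _ _ _ _ hx hxR (by omega) (by rw [hrl]; omega)
        · rw [if_neg (by push_cast at hc hc2 ⊢; omega)]
          rw [hd1]
          exact get2_set2_ne _ _ _ _ _ _ (by push_cast at hc2 ⊢; omega) hx (by omega) hi hj
    · rw [hm1'] at MLE
      exact MLE.trans (min_le_left _ _)
    · intro j hj1 hj2
      by_cases hc : j < y1 + ↑n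
      · have hb := MB j hj1 hc
        rw [hd1, get2_set2_ne _ _ _ _ _ _ (Or.inr (by omega)) hx (by omega) hx (by omega)] at hb
        exact hb
      · have hj : j = y1 + ↑n := by push_cast at hj2 ⊢; omega
        subst hj
        rw [hm1'] at MLE
        exact MLE.trans (min_le_right _ _)
    · rcases MA with h | ⟨j, hj1, hj2, he⟩
      · rcases min_cases m (get2 d x1 (y1 + ↑n)) with ⟨he2, _⟩ | ⟨he2, _⟩
        · exact Or.inl (by rw [h, hm1', he2])
        · exact Or.inr ⟨y1 + ↑n, by omega, by push_cast; omega, by rw [h, hm1', he2]⟩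
      · refine Or.inr ⟨j, hj1, by push_cast at hj2 ⊢; omega, ?_⟩
        rw [he, hd1]
        exact get2_set2_ne _ _ _ _ _ _ (Or.inr (by omega)) hx (by omega) hx (by omega)
set_option maxHeartbeats 1000000 in
theorem loopBottom_char (x2 : Int) {C : Nat} (n : Nat) :
    ∀ (y1 : Int) (d : List (List Int)) (m : Int) (res : List (List Int) × Int),
    res = (PySem.List.pyRange y1 (y1 + n) 1).foldl
        (fun s i =>
          let dd := set2 s.1 x2 i (get2 s.1 x2 (i + 1))
          (dd, min s.2 (get2 dd x2 (i + 1)))) (d, m) →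
    (∀ r ∈ d, r.length = C) → 0 ≤ x2 → x2 < (d.length : Int) → 0 ≤ y1 → y1 + n < (C : Int) →
    res.1.length = d.length ∧ (∀ r ∈ res.1, r.length = C)
    ∧ (∀ i j : Int, 0 ≤ i → 0 ≤ j →
        get2 res.1 i j = if i = x2 ∧ y1 ≤ j ∧ j < y1 + n then get2 d x2 (j + 1) else get2 d i j)
    ∧ res.2 ≤ m
    ∧ (∀ j : Int, y1 < j → j ≤ y1 + n → res.2 ≤ get2 d x2 j)
    ∧ (res.2 = m ∨ ∃ j : Int, y1 < j ∧ j ≤ y1 + n ∧ res.2 = get2 d x2 j) := by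
  induction n with
  | zero =>
    intro y1 d m res hres hrow hx hxR hy hyC
    rw [show y1 + ((0:Nat):Int) = y1 by push_cast; ring] at hres
    rw [PySem.List.pyRange_one_eq_nil (by omega), List.foldl_nil] at hres
    subst hres
    refine ⟨rfl, hrow, ?_, le_refl _, ?_, Or.inl rfl⟩
    · intro i j hi hj
      rw [if_neg (by omega)]
    · intro j hj1 hj2; omega
  | succ n ih =>
    intro y1 d m res hres hrow hx hxR hy hyC
    have e1 : y1 + (↑(n + 1) : Int) = (y1 + 1) + ↑n := by push_cast; ring
    rw [e1, PySem.List.pyRange_one_cons (by omega), List.foldl_cons] at hres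
    set d1 := set2 d x2 y1 (get2 d x2 (y1 + 1)) with hd1
    set m1 := min m (get2 d1 x2 (y1 + 1)) with hm1
    have hres2 : res = (PySem.List.pyRange (y1 + 1) (y1 + 1 + ↑n) 1).foldl
        (fun s i =>
          let dd := set2 s.1 x2 i (get2 s.1 x2 (i + 1))
          (dd, min s.2 (get2 dd x2 (i + 1)))) (d1, m1) := hres
    have hlen1 : d1.length = d.length := length_set2 _ _ _ _
    have hrow1 : ∀ r ∈ d1, r.length = C := rows_set2 _ _ _ _ hrow
    have hread : get2 d1 x2 (y1 + 1) = get2 d x2 (y1 + 1) := by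
      rw [hd1]; exact get2_set2_ne _ _ _ _ _ _ (Or.inr (by omega)) hx hy hx (by omega)
    obtain ⟨L, RWS, PT, MLE, MB, MA⟩ :=
      ih (y1 + 1) d1 m1 res hres2 hrow1 hx (by omega) (by omega) (by push_cast at hyC ⊢; omega)
    have hm1' : m1 = min m (get2 d x2 (y1 + 1)) := by rw [hm1, hread]
    refine ⟨L.trans hlen1, RWS, ?_, ?_, ?_, ?_⟩
    · intro i j hi hj
      rw [PT i j hi hj]
      by_cases hc : i = x2 ∧ y1 + 1 ≤ j ∧ j < y1 + 1 + ↑n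
      · rw [if_pos hc, if_pos (by push_cast at hc ⊢; omega)]
        rw [hd1]
        exact get2_set2_ne _ _ _ _ _ _ (Or.inr (by omega)) hx hy hx (by omega)
      · rw [if_neg hc]
        by_cases hc2 : i = x2 ∧ j = y1
        · rw [if_pos (by push_cast at hc2 ⊢; omega)]
          obtain ⟨hcx, hcy⟩ := hc2
          subst hcx
          rw [hcy, hd1]
          have hrl := rowlen_get2 d i hrow hx hxR
          exact get2_set2_eq _ _ _ _ hx hxR hy (by rw [hrl]; omega)
        · rw [if_neg (by push_cast at hc hc2 ⊢; omega)]
          rw [hd1]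
          exact get2_set2_ne _ _ _ _ _ _ (by omega) hx hy hi hj
    · rw [hm1'] at MLE
      exact MLE.trans (min_le_left _ _)
    · intro j hj1 hj2
      by_cases hc : y1 + 1 < j
      · have hb := MB j hc (by push_cast at hj2 ⊢; omega)
        rw [hd1, get2_set2_ne _ _ _ _ _ _ (Or.inr (by omega)) hx hy hx (by omega)] at hb
        exact hb
      · have hj : j = y1 + 1 := by omega
        subst hj
        rw [hm1'] at MLE
        exact MLE.trans (min_le_right _ _)
    · rcases MA with h | ⟨j, hj1, hj2, he⟩
      · rcases min_cases m (get2 d x2 (y1 + 1)) with ⟨he2, _⟩ | ⟨he2, _⟩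
        · exact Or.inl (by rw [h, hm1', he2])
        · exact Or.inr ⟨y1 + 1, by omega, by push_cast; omega, by rw [h, hm1', he2]⟩
      · refine Or.inr ⟨j, by omega, by push_cast at hj2 ⊢; omega, ?_⟩
        rw [he, hd1]
        exact get2_set2_ne _ _ _ _ _ _ (Or.inr (by omega)) hx hy hx (by omega)
set_option maxHeartbeats 1000000 in
theorem loopRight_char (x1 y2 : Int) {C : Nat} (n : Nat) :
    ∀ (d : List (List Int)) (m : Int) (res : List (List Int) × Int),
    res = (PySem.List.pyRange (x1 + n) x1 (-1)).foldl
        (fun s i =>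
          let dd := set2 s.1 i y2 (get2 s.1 (i - 1) y2)
          (dd, min s.2 (get2 dd (i - 1) y2))) (d, m) →
    (∀ r ∈ d, r.length = C) → 0 ≤ x1 → x1 + n < (d.length : Int) → 0 ≤ y2 → y2 < (C : Int) →
    res.1.length = d.length ∧ (∀ r ∈ res.1, r.length = C)
    ∧ (∀ i j : Int, 0 ≤ i → 0 ≤ j →
        get2 res.1 i j = if j = y2 ∧ x1 < i ∧ i ≤ x1 + n then get2 d (i - 1) y2 else get2 d i j)
    ∧ res.2 ≤ m
    ∧ (∀ i : Int, x1 ≤ i → i < x1 + n → res.2 ≤ get2 d i y2)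
    ∧ (res.2 = m ∨ ∃ i : Int, x1 ≤ i ∧ i < x1 + n ∧ res.2 = get2 d i y2) := by
  induction n with
  | zero =>
    intro d m res hres hrow hx hxR hy hyC
    rw [PySem.List.pyRange_neg_one_eq_nil (by omega), List.foldl_nil] at hres
    subst hres
    refine ⟨rfl, hrow, ?_, le_refl _, ?_, Or.inl rfl⟩
    · intro i j hi hj
      rw [if_neg (by omega)]
    · intro i hi1 hi2; omega
  | succ n ih =>
    intro d m res hres hrow hx hxR hy hyC
    have e1 : x1 + (↑(n + 1) : Int) - 1 = x1 + ↑n := by push_cast; ring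
    rw [PySem.List.pyRange_neg_one_cons (by omega), List.foldl_cons, e1] at hres
    set d1 := set2 d (x1 + ↑(n + 1)) y2 (get2 d (x1 + ↑n) y2) with hd1
    set m1 := min m (get2 d1 (x1 + ↑n) y2) with hm1
    have hres2 : res = (PySem.List.pyRange (x1 + ↑n) x1 (-1)).foldl
        (fun s i =>
          let dd := set2 s.1 i y2 (get2 s.1 (i - 1) y2)
          (dd, min s.2 (get2 dd (i - 1) y2))) (d1, m1) := hres
    have hlen1 : d1.length = d.length := length_set2 _ _ _ _
    have hrow1 : ∀ r ∈ d1, r.length = C := rows_set2 _ _ _ _ hrow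
    have hread : get2 d1 (x1 + ↑n) y2 = get2 d (x1 + ↑n) y2 := by
      rw [hd1]; exact get2_set2_ne _ _ _ _ _ _ (Or.inl (by omega)) (by omega) hy (by omega) hy
    obtain ⟨L, RWS, PT, MLE, MB, MA⟩ :=
      ih d1 m1 res hres2 hrow1 hx (by rw [hlen1]; push_cast at hxR ⊢; omega) hy hyC
    have hm1' : m1 = min m (get2 d (x1 + ↑n) y2) := by rw [hm1, hread]
    refine ⟨L.trans hlen1, RWS, ?_, ?_, ?_, ?_⟩
    · intro i j hi hj
      rw [PT i j hi hj]
      by_cases hc : j = y2 ∧ x1 < i ∧ i ≤ x1 + ↑n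
      · rw [if_pos hc, if_pos (by push_cast at hc ⊢; omega)]
        rw [hd1]
        exact get2_set2_ne _ _ _ _ _ _ (Or.inl (by omega)) (by omega) hy (by omega) hy
      · rw [if_neg hc]
        by_cases hc2 : j = y2 ∧ i = x1 + ↑(n + 1)
        · rw [if_pos (by push_cast at hc2 ⊢; omega)]
          obtain ⟨hcy, hcx⟩ := hc2
          subst hcy
          rw [hcx, hd1]
          rw [show x1 + (↑(n + 1) : Int) - 1 = x1 + ↑n from e1]
          have hrl := rowlen_get2 d (x1 + ↑(n + 1)) hrow (by omega) (by push_cast at hxR ⊢; omega)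
          exact get2_set2_eq _ _ _ _ (by omega) (by push_cast at hxR ⊢; omega) hy (by rw [hrl]; omega)
        · rw [if_neg (by push_cast at hc hc2 ⊢; omega)]
          rw [hd1]
          exact get2_set2_ne _ _ _ _ _ _ (by push_cast at hc2 ⊢; omega) (by omega) hy hi hj
    · rw [hm1'] at MLE
      exact MLE.trans (min_le_left _ _)
    · intro i hi1 hi2
      by_cases hc : i < x1 + ↑n
      · have hb := MB i hi1 hc
        rw [hd1, get2_set2_ne _ _ _ _ _ _ (Or.inl (by omega)) (by omega) hy (by omega) hy] at hb
        exact hb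
      · have hi : i = x1 + ↑n := by push_cast at hi2 ⊢; omega
        subst hi
        rw [hm1'] at MLE
        exact MLE.trans (min_le_right _ _)
    · rcases MA with h | ⟨i, hi1, hi2, he⟩
      · rcases min_cases m (get2 d (x1 + ↑n) y2) with ⟨he2, _⟩ | ⟨he2, _⟩
        · exact Or.inl (by rw [h, hm1', he2])
        · exact Or.inr ⟨x1 + ↑n, by omega, by push_cast; omega, by rw [h, hm1', he2]⟩
      · refine Or.inr ⟨i, hi1, by push_cast at hi2 ⊢; omega, ?_⟩
        rw [he, hd1]
        exact get2_set2_ne _ _ _ _ _ _ (Or.inl (by omega)) (by omega) hy (by omega) hy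

set_option maxHeartbeats 1000000 in
theorem loopLeft_char (y1 : Int) {C : Nat} (n : Nat) :
    ∀ (x1 : Int) (d : List (List Int)) (m : Int) (res : List (List Int) × Int),
    res = (PySem.List.pyRange x1 (x1 + n) 1).foldl
        (fun s i =>
          let dd := set2 s.1 i y1 (get2 s.1 (i + 1) y1)
          (dd, min s.2 (get2 dd (i + 1) y1))) (d, m) →
    (∀ r ∈ d, r.length = C) → 0 ≤ x1 → x1 + n < (d.length : Int) → 0 ≤ y1 → y1 < (C : Int) →
    res.1.length = d.length ∧ (∀ r ∈ res.1, r.length = C)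
    ∧ (∀ i j : Int, 0 ≤ i → 0 ≤ j →
        get2 res.1 i j = if j = y1 ∧ x1 ≤ i ∧ i < x1 + n then get2 d (i + 1) y1 else get2 d i j)
    ∧ res.2 ≤ m
    ∧ (∀ i : Int, x1 < i → i ≤ x1 + n → res.2 ≤ get2 d i y1)
    ∧ (res.2 = m ∨ ∃ i : Int, x1 < i ∧ i ≤ x1 + n ∧ res.2 = get2 d i y1) := by
  induction n with
  | zero =>
    intro x1 d m res hres hrow hx hxR hy hyC
    rw [show x1 + ((0:Nat):Int) = x1 by push_cast; ring] at hres
    rw [PySem.List.pyRange_one_eq_nil (by omega), List.foldl_nil] at hres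
    subst hres
    refine ⟨rfl, hrow, ?_, le_refl _, ?_, Or.inl rfl⟩
    · intro i j hi hj
      rw [if_neg (by omega)]
    · intro i hi1 hi2; omega
  | succ n ih =>
    intro x1 d m res hres hrow hx hxR hy hyC
    have e1 : x1 + (↑(n + 1) : Int) = (x1 + 1) + ↑n := by push_cast; ring
    rw [e1, PySem.List.pyRange_one_cons (by omega), List.foldl_cons] at hres
    set d1 := set2 d x1 y1 (get2 d (x1 + 1) y1) with hd1
    set m1 := min m (get2 d1 (x1 + 1) y1) with hm1
    have hres2 : res = (PySem.List.pyRange (x1 + 1) (x1 + 1 + ↑n) 1).foldl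
        (fun s i =>
          let dd := set2 s.1 i y1 (get2 s.1 (i + 1) y1)
          (dd, min s.2 (get2 dd (i + 1) y1))) (d1, m1) := hres
    have hlen1 : d1.length = d.length := length_set2 _ _ _ _
    have hrow1 : ∀ r ∈ d1, r.length = C := rows_set2 _ _ _ _ hrow
    have hread : get2 d1 (x1 + 1) y1 = get2 d (x1 + 1) y1 := by
      rw [hd1]; exact get2_set2_ne _ _ _ _ _ _ (Or.inl (by omega)) hx hy (by omega) hy
    obtain ⟨L, RWS, PT, MLE, MB, MA⟩ :=
      ih (x1 + 1) d1 m1 res hres2 hrow1 (by omega)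
        (by rw [hlen1]; push_cast at hxR ⊢; omega) hy hyC
    have hm1' : m1 = min m (get2 d (x1 + 1) y1) := by rw [hm1, hread]
    refine ⟨L.trans hlen1, RWS, ?_, ?_, ?_, ?_⟩
    · intro i j hi hj
      rw [PT i j hi hj]
      by_cases hc : j = y1 ∧ x1 + 1 ≤ i ∧ i < x1 + 1 + ↑n
      · rw [if_pos hc, if_pos (by push_cast at hc ⊢; omega)]
        rw [hd1]
        exact get2_set2_ne _ _ _ _ _ _ (Or.inl (by omega)) hx hy (by omega) hy
      · rw [if_neg hc]
        by_cases hc2 : j = y1 ∧ i = x1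
        · rw [if_pos (by push_cast at hc2 ⊢; omega)]
          obtain ⟨hcy, hcx⟩ := hc2
          subst hcy
          rw [hcx, hd1]
          have hrl := rowlen_get2 d x1 hrow hx (by push_cast at hxR ⊢; omega)
          exact get2_set2_eq _ _ _ _ hx (by push_cast at hxR ⊢; omega) hy (by rw [hrl]; omega)
        · rw [if_neg (by push_cast at hc hc2 ⊢; omega)]
          rw [hd1]
          exact get2_set2_ne _ _ _ _ _ _ (by omega) hx hy hi hj
    · rw [hm1'] at MLE
      exact MLE.trans (min_le_left _ _)
    · intro i hi1 hi2
      by_cases hc : x1 + 1 < i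
      · have hb := MB i hc (by push_cast at hi2 ⊢; omega)
        rw [hd1, get2_set2_ne _ _ _ _ _ _ (Or.inl (by omega)) hx hy (by omega) hy] at hb
        exact hb
      · have hi : i = x1 + 1 := by omega
        subst hi
        rw [hm1'] at MLE
        exact MLE.trans (min_le_right _ _)
    · rcases MA with h | ⟨i, hi1, hi2, he⟩
      · rcases min_cases m (get2 d (x1 + 1) y1) with ⟨he2, _⟩ | ⟨he2, _⟩
        · exact Or.inl (by rw [h, hm1', he2])
        · exact Or.inr ⟨x1 + 1, by omega, by push_cast; omega, by rw [h, hm1', he2]⟩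
      · refine Or.inr ⟨i, by omega, by push_cast at hi2 ⊢; omega, ?_⟩
        rw [he, hd1]
        exact get2_set2_ne _ _ _ _ _ _ (Or.inl (by omega)) hx hy (by omega) hy
theorem enum_len {α : Type} : ∀ (d : List α) (s : Int),
    (PySem.List.enumerate d s).length = d.length := by
  intro d
  induction d with
  | nil => intro s; simp [PySem.List.enumerate]
  | cons x t ih => intro s; simp [PySem.List.enumerate, ih]

theorem enum_get {α : Type} : ∀ (d : List α) (s : Int) (k : Nat) (h : k < d.length),
    (PySem.List.enumerate d s)[k]'(by rw [enum_len]; exact h) = (s + k, d[k]) := by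
  intro d
  induction d with
  | nil => intro s k h; simp at h
  | cons x t ih =>
    intro s k h
    cases k with
    | zero => simp [PySem.List.enumerate]
    | succ k =>
      have := ih (s + 1) k (by simpa using h)
      simp only [PySem.List.enumerate, List.getElem_cons_succ, this]
      have h2 : s + 1 + (k:Int) = s + ↑(k + 1) := by push_cast; ring
      rw [h2]

theorem moveB_len (data : List (List Int)) (x1 y1 x2 y2 : Int) :
    (moveB data x1 y1 x2 y2).1.length = data.length := by
  simp only [moveB]
  rw [List.length_map, enum_len]

theorem moveB_rows {C : Nat} (data : List (List Int)) (x1 y1 x2 y2 : Int)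
    (hrow : ∀ r ∈ data, r.length = C) :
    ∀ r ∈ (moveB data x1 y1 x2 y2).1, r.length = C := by
  intro r hr
  simp only [moveB] at hr
  obtain ⟨p, hp, hpr⟩ := List.mem_map.1 hr
  obtain ⟨k, hk, hkp⟩ := List.mem_iff_getElem.1 hp
  have hk' : k < data.length := by rw [enum_len] at hk; exact hk
  rw [enum_get data 0 k hk'] at hkp
  subst hpr
  rw [← hkp]
  simp only [List.length_map, PySem.List.length_pyRange_one, PySem.List.len]
  have := hrow data[k] (List.getElem_mem _)
  omega

theorem moveB_get2 {C : Nat} (data : List (List Int)) (x1 y1 x2 y2 : Int)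
    (hrow : ∀ r ∈ data, r.length = C) (i j : Int)
    (hi : 0 ≤ i) (hiR : i < (data.length : Int)) (hj : 0 ≤ j) (hjC : j < (C : Int)) :
    get2 (moveB data x1 y1 x2 y2).1 i j = srcB data x1 y1 x2 y2 i j := by
  have hit : i.toNat < data.length := by omega
  have houter : ((moveB data x1 y1 x2 y2).1)[i.toNat]? =
      some ((PySem.List.pyRange 0 (PySem.List.len data[i.toNat]) 1).map
        (fun j => srcB data x1 y1 x2 y2 (0 + (i.toNat : Int)) j)) := by
    simp only [moveB]
    rw [List.getElem?_eq_getElem (by rw [List.length_map, enum_len]; exact hit)]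
    rw [List.getElem_map, enum_get data 0 i.toNat hit]
  rw [get2_nn _ _ _ hi hj, houter, Option.getD_some]
  have hlenrow : PySem.List.len data[i.toNat] = ((C : Nat) : Int) := by
    rw [PySem.List.len_eq, hrow _ (List.getElem_mem _)]
  rw [hlenrow, PySem.List.getElem?_map_pyRange_zero _ _ _ (by omega), Option.getD_some]
  rw [show (0 : Int) + (i.toNat : Int) = i by omega, show ((j.toNat : Nat) : Int) = j by omega]

theorem ext2 (d1 d2 : List (List Int)) {C : Nat}
    (hl : d1.length = d2.length)
    (hr1 : ∀ r ∈ d1, r.length = C) (hr2 : ∀ r ∈ d2, r.length = C)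
    (h : ∀ i j : Int, 0 ≤ i → i < (d1.length : Int) → 0 ≤ j → j < (C : Int) →
      get2 d1 i j = get2 d2 i j) : d1 = d2 := by
  apply List.ext_getElem hl
  intro n h1 h2
  have hrl1 := hr1 d1[n] (List.getElem_mem _)
  have hrl2 := hr2 d2[n] (List.getElem_mem _)
  apply List.ext_getElem (by omega)
  intro k k1 k2
  have := h n k (by omega) (by omega) (by omega) (by omega)
  rw [get2_nn _ _ _ (by omega) (by omega), get2_nn _ _ _ (by omega) (by omega)] at this
  simp only [Int.toNat_natCast] at this
  rw [List.getElem?_eq_getElem h1, Option.getD_some,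
    List.getElem?_eq_getElem (show k < d1[n].length by omega), Option.getD_some,
    List.getElem?_eq_getElem h2, Option.getD_some,
    List.getElem?_eq_getElem (show k < d2[n].length by omega), Option.getD_some] at this
  exact this
theorem memB_top (data : List (List Int)) (x1 y1 x2 y2 j : Int)
    (h1 : y1 ≤ j) (h2 : j ≤ y2) :
    get2 data x1 j ∈ borderB data x1 y1 x2 y2 := by
  unfold borderB
  exact List.mem_append_left _ (List.mem_append_left _ (List.mem_append_left _
    (List.mem_map.2 ⟨j, PySem.List.mem_pyRange_one.2 ⟨h1, by omega⟩, rfl⟩)))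

theorem memB_right (data : List (List Int)) (x1 y1 x2 y2 i : Int)
    (h1 : x1 ≤ i) (h2 : i ≤ x2) (hy : y1 ≤ y2) :
    get2 data i y2 ∈ borderB data x1 y1 x2 y2 := by
  by_cases hc : i = x1
  · subst hc; exact memB_top data i y1 x2 y2 y2 hy (le_refl _)
  · unfold borderB
    refine List.mem_append_left _ (List.mem_append_left _ (List.mem_append_right _
      (List.mem_map.2 ⟨i, PySem.List.mem_pyRange_one.2 ⟨by omega, by omega⟩, rfl⟩)))

theorem memB_bottom (data : List (List Int)) (x1 y1 x2 y2 j : Int)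
    (h1 : y1 ≤ j) (h2 : j ≤ y2) (hx : x1 < x2) :
    get2 data x2 j ∈ borderB data x1 y1 x2 y2 := by
  by_cases hc : j = y2
  · subst hc; exact memB_right data x1 y1 x2 j x2 (by omega) (le_refl _) (by omega)
  · unfold borderB
    refine List.mem_append_left _ (List.mem_append_right _
      (List.mem_map.2 ⟨j, PySem.List.mem_pyRange_one.2 ⟨h1, by omega⟩, rfl⟩))

theorem memB_left (data : List (List Int)) (x1 y1 x2 y2 i : Int)
    (h1 : x1 ≤ i) (h2 : i ≤ x2) (hx : x1 < x2) (hy : y1 < y2) :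
    get2 data i y1 ∈ borderB data x1 y1 x2 y2 := by
  by_cases hc : i = x1
  · subst hc; exact memB_top data i y1 x2 y2 y1 (le_refl _) (by omega)
  · by_cases hc2 : i = x2
    · subst hc2; exact memB_bottom data x1 y1 i y2 y1 (le_refl _) (by omega) hx
    · unfold borderB
      exact List.mem_append_right _
        (List.mem_map.2 ⟨i, PySem.List.mem_pyRange_one.2 ⟨by omega, by omega⟩, rfl⟩)

-- every border element is a matrix value on the ring
theorem border_elim (data : List (List Int)) (x1 y1 x2 y2 : Int) (v : Int)
    (hv : v ∈ borderB data x1 y1 x2 y2) :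
    (∃ j, y1 ≤ j ∧ j ≤ y2 ∧ v = get2 data x1 j) ∨
    (∃ i, x1 < i ∧ i ≤ x2 ∧ v = get2 data i y2) ∨
    (∃ j, y1 ≤ j ∧ j < y2 ∧ v = get2 data x2 j) ∨
    (∃ i, x1 < i ∧ i < x2 ∧ v = get2 data i y1) := by
  unfold borderB at hv
  rcases List.mem_append.1 hv with hv | hv
  · rcases List.mem_append.1 hv with hv | hv
    · rcases List.mem_append.1 hv with hv | hv
      · obtain ⟨j, hj, rfl⟩ := List.mem_map.1 hv
        exact Or.inl ⟨j, (PySem.List.mem_pyRange_one.1 hj).1, by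
          have := (PySem.List.mem_pyRange_one.1 hj).2; omega, rfl⟩
      · obtain ⟨i, hi, rfl⟩ := List.mem_map.1 hv
        have := PySem.List.mem_pyRange_one.1 hi
        exact Or.inr (Or.inl ⟨i, by omega, by omega, rfl⟩)
    · obtain ⟨j, hj, rfl⟩ := List.mem_map.1 hv
      have := PySem.List.mem_pyRange_one.1 hj
      exact Or.inr (Or.inr (Or.inl ⟨j, by omega, by omega, rfl⟩))
  · obtain ⟨i, hi, rfl⟩ := List.mem_map.1 hv
    have := PySem.List.mem_pyRange_one.1 hi
    exact Or.inr (Or.inr (Or.inr ⟨i, by omega, by omega, rfl⟩))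

theorem moveB_min (data : List (List Int)) (x1 y1 x2 y2 : Int) (hy : y1 ≤ y2) :
    (moveB data x1 y1 x2 y2).2 ∈ borderB data x1 y1 x2 y2
    ∧ ∀ v ∈ borderB data x1 y1 x2 y2, (moveB data x1 y1 x2 y2).2 ≤ v := by
  have hne : borderB data x1 y1 x2 y2 ≠ [] := by
    intro hc
    have := memB_top data x1 y1 x2 y2 y1 (le_refl _) hy
    rw [hc] at this
    simp at this
  rcases hmin : PySem.List.min? (borderB data x1 y1 x2 y2) (fun v => v) with _ | m
  · exact absurd ((PySem.List.min?_eq_none_iff _ _).1 hmin) hne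
  · have h1 := PySem.List.min?_mem hmin
    have h2 := PySem.List.min?_isMin hmin
    constructor
    · show (PySem.List.min? (borderB data x1 y1 x2 y2) (fun v => v)).getD 0 ∈ _
      rw [hmin, Option.getD_some]; exact h1
    · intro v hv
      show (PySem.List.min? (borderB data x1 y1 x2 y2) (fun v => v)).getD 0 ≤ v
      rw [hmin, Option.getD_some]; exact h2 v hv
set_option maxHeartbeats 2000000 in
theorem move_eq {C : Nat} (d : List (List Int)) (x1 y1 x2 y2 : Int)
    (hrow : ∀ r ∈ d, r.length = C)
    (hx1 : 1 ≤ x1) (hx12 : x1 < x2) (hx2R : x2 < (d.length : Int))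
    (hy1 : 1 ≤ y1) (hy12 : y1 < y2) (hy2C : y2 < (C : Int)) :
    moveA d x1 y1 x2 y2 = moveB d x1 y1 x2 y2 := by
  obtain ⟨n1, hn1⟩ : ∃ n : Nat, y2 = y1 + (n : Int) := ⟨(y2 - y1).toNat, by omega⟩
  obtain ⟨n2, hn2⟩ : ∃ n : Nat, x2 = x1 + (n : Int) := ⟨(x2 - x1).toNat, by omega⟩
  subst hn1 hn2
  set mn := min (get2 d x1 (y1 + ↑n1)) (get2 d (x1 + ↑n2) y1) with hmn
  set s1 := (PySem.List.pyRange (y1 + ↑n1) y1 (-1)).foldl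
    (fun s i =>
      let dd := set2 s.1 x1 i (get2 s.1 x1 (i - 1))
      (dd, min s.2 (get2 dd x1 (i - 1)))) (d, mn) with hs1
  set s2 := (PySem.List.pyRange y1 (y1 + ↑n1) 1).foldl
    (fun s i =>
      let dd := set2 s.1 (x1 + ↑n2) i (get2 s.1 (x1 + ↑n2) (i + 1))
      (dd, min s.2 (get2 dd (x1 + ↑n2) (i + 1)))) s1 with hs2
  set s3 := (PySem.List.pyRange (x1 + ↑n2) x1 (-1)).foldl
    (fun s i =>
      let dd := set2 s.1 i (y1 + ↑n1) (get2 s.1 (i - 1) (y1 + ↑n1))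
      (dd, min s.2 (get2 dd (i - 1) (y1 + ↑n1)))) s2 with hs3
  set s4 := (PySem.List.pyRange x1 (x1 + ↑n2) 1).foldl
    (fun s i =>
      let dd := set2 s.1 i y1 (get2 s.1 (i + 1) y1)
      (dd, min s.2 (get2 dd (i + 1) y1))) s3 with hs4
  have hA : moveA d x1 y1 (x1 + ↑n2) (y1 + ↑n1) =
      (set2 (set2 s4.1 (x1 + ↑n2 - 1) y1 (get2 d (x1 + ↑n2) y1)) (x1 + 1) (y1 + ↑n1)
        (get2 d x1 (y1 + ↑n1)), s4.2) := rfl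
  obtain ⟨L1, R1, P1, ML1, MB1, MA1⟩ :=
    loopTop_char x1 y1 (C := C) n1 d mn s1 hs1 hrow (by omega) (by omega) (by omega) (by omega)
  obtain ⟨L2, R2, P2, ML2, MB2, MA2⟩ :=
    loopBottom_char (x1 + ↑n2) (C := C) n1 y1 s1.1 s1.2 s2 (by rw [hs2]) R1 (by omega)
      (by rw [L1]; exact hx2R) (by omega) (by omega)
  obtain ⟨L3, R3, P3, ML3, MB3, MA3⟩ :=
    loopRight_char x1 (y1 + ↑n1) (C := C) n2 s2.1 s2.2 s3 (by rw [hs3]) R2 (by omega)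
      (by rw [L2, L1]; exact hx2R) (by omega) (by omega)
  obtain ⟨L4, R4, P4, ML4, MB4, MA4⟩ :=
    loopLeft_char y1 (C := C) n2 x1 s3.1 s3.2 s4 (by rw [hs4]) R3 (by omega)
      (by rw [L3, L2, L1]; exact hx2R) (by omega) (by omega)
  have hlen4 : s4.1.length = d.length := by rw [L4, L3, L2, L1]
  rw [hA]
  -- the two corner writes, pointwise
  set M1 := set2 s4.1 (x1 + ↑n2 - 1) y1 (get2 d (x1 + ↑n2) y1) with hM1
  set M2 := set2 M1 (x1 + 1) (y1 + ↑n1) (get2 d x1 (y1 + ↑n1)) with hM2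
  have hlenM1 : M1.length = d.length := by rw [hM1, length_set2, hlen4]
  have hlenM2 : M2.length = d.length := by rw [hM2, length_set2, hlenM1]
  have rowsM1 : ∀ r ∈ M1, r.length = C := rows_set2 _ _ _ _ R4
  have rowsM2 : ∀ r ∈ M2, r.length = C := rows_set2 _ _ _ _ rowsM1
  have E5 : ∀ i j : Int, 0 ≤ i → i < (d.length : Int) → 0 ≤ j → j < (C : Int) →
      get2 M2 i j =
        if i = x1 + 1 ∧ j = y1 + ↑n1 then get2 d x1 (y1 + ↑n1)
        else if i = x1 + ↑n2 - 1 ∧ j = y1 then get2 d (x1 + ↑n2) y1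
        else get2 s4.1 i j := by
    intro i j hi hiR hj hjC
    by_cases c1 : i = x1 + 1 ∧ j = y1 + ↑n1
    · rw [if_pos c1, hM2]
      obtain ⟨e1, e2⟩ := c1
      subst e1; subst e2
      have hrl := rowlen_get2 M1 (x1 + 1) rowsM1 (by omega) (by omega)
      exact get2_set2_eq _ _ _ _ (by omega) (by omega) (by omega) (by rw [hrl]; omega)
    · rw [if_neg c1, hM2]
      rw [get2_set2_ne _ _ _ _ _ _ (by omega) (by omega) (by omega) hi hj]
      by_cases c2 : i = x1 + ↑n2 - 1 ∧ j = y1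
      · rw [if_pos c2, hM1]
        obtain ⟨e1, e2⟩ := c2
        subst e1; subst e2
        have hrl := rowlen_get2 s4.1 (x1 + ↑n2 - 1) R4 (by omega) (by omega)
        exact get2_set2_eq _ _ _ _ (by omega) (by omega) (by omega) (by rw [hrl]; omega)
      · rw [if_neg c2, hM1]
        rw [get2_set2_ne _ _ _ _ _ _ (by omega) (by omega) (by omega) hi hj]
  refine Prod.ext ?_ ?_
  · -- matrices agree
    show M2 = (moveB d x1 y1 (x1 + ↑n2) (y1 + ↑n1)).1
    apply ext2 (C := C) _ _ (by rw [hlenM2, moveB_len]) rowsM2 (moveB_rows _ _ _ _ _ hrow)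
    intro i j hi hiR hj hjC
    rw [hlenM2] at hiR
    rw [moveB_get2 _ _ _ _ _ hrow i j hi (by omega) hj hjC]
    unfold srcB
    rw [E5 i j hi (by omega) hj hjC]
    by_cases cT : i = x1 ∧ y1 < j ∧ j ≤ y1 + ↑n1
    · rw [if_pos cT, if_neg (by omega), if_neg (by omega), P4 i j hi hj, if_neg (by omega),
        P3 i j hi hj, if_neg (by omega), P2 i j hi hj, if_neg (by omega), P1 i j hi hj,
        if_pos cT]
    · rw [if_neg cT]
      by_cases cR : j = y1 + ↑n1 ∧ x1 < i ∧ i ≤ x1 + ↑n2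
      · rw [if_pos cR]
        by_cases cc : i = x1 + 1
        · rw [if_pos ⟨cc, cR.1⟩, show i - 1 = x1 by omega]
        · rw [if_neg (by omega), if_neg (by omega), P4 i j hi hj, if_neg (by omega),
            P3 i j hi hj, if_pos cR, P2 (i - 1) (y1 + ↑n1) (by omega) (by omega),
            if_neg (by omega), P1 (i - 1) (y1 + ↑n1) (by omega) (by omega), if_neg (by omega)]
      · rw [if_neg cR]
        by_cases cB : i = x1 + ↑n2 ∧ y1 ≤ j ∧ j < y1 + ↑n1
        · rw [if_pos cB, if_neg (by omega), if_neg (by omega), P4 i j hi hj, if_neg (by omega),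
            P3 i j hi hj, if_neg (by omega), P2 i j hi hj, if_pos cB,
            P1 (x1 + ↑n2) (j + 1) (by omega) (by omega), if_neg (by omega)]
        · rw [if_neg cB]
          by_cases cL : j = y1 ∧ x1 ≤ i ∧ i < x1 + ↑n2
          · rw [if_pos cL]
            by_cases cc : i = x1 + ↑n2 - 1
            · rw [if_neg (by omega), if_pos ⟨cc, cL.1⟩, show i + 1 = x1 + ↑n2 by omega]
            · rw [if_neg (by omega), if_neg (by omega), P4 i j hi hj, if_pos cL,
                P3 (i + 1) y1 (by omega) (by omega), if_neg (by omega),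
                P2 (i + 1) y1 (by omega) (by omega), if_neg (by omega),
                P1 (i + 1) y1 (by omega) (by omega), if_neg (by omega)]
          · rw [if_neg cL, if_neg (by omega), if_neg (by omega), P4 i j hi hj, if_neg cL,
              P3 i j hi hj, if_neg cR, P2 i j hi hj, if_neg cB, P1 i j hi hj, if_neg cT]
  · -- minima agree
    show s4.2 = (moveB d x1 y1 (x1 + ↑n2) (y1 + ↑n1)).2
    obtain ⟨hBmem, hBmin⟩ := moveB_min d x1 y1 (x1 + ↑n2) (y1 + ↑n1) (by omega)
    have hchain : s4.2 ≤ s1.2 := le_trans ML4 (le_trans ML3 ML2)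
    have hmnle : s4.2 ≤ mn := hchain.trans ML1
    have hminL : mn ≤ get2 d x1 (y1 + ↑n1) := by rw [hmn]; exact min_le_left _ _
    have hminR : mn ≤ get2 d (x1 + ↑n2) y1 := by rw [hmn]; exact min_le_right _ _
    have T1 : ∀ j : Int, y1 ≤ j → j ≤ y1 + ↑n1 → s4.2 ≤ get2 d x1 j := by
      intro j h1 h2
      by_cases hc : j = y1 + ↑n1
      · subst hc; exact hmnle.trans hminL
      · exact hchain.trans (MB1 j h1 (by omega))
    have T3 : ∀ j : Int, y1 ≤ j → j ≤ y1 + ↑n1 → s4.2 ≤ get2 d (x1 + ↑n2) j := by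
      intro j h1 h2
      by_cases hc : j = y1
      · subst hc; exact hmnle.trans hminR
      · have hb := MB2 j (by omega) h2
        rw [P1 (x1 + ↑n2) j (by omega) (by omega), if_neg (by omega)] at hb
        exact (le_trans ML4 ML3).trans hb
    have T2 : ∀ i : Int, x1 ≤ i → i ≤ x1 + ↑n2 → s4.2 ≤ get2 d i (y1 + ↑n1) := by
      intro i h1 h2
      by_cases hc : i = x1
      · rw [hc]; exact T1 (y1 + ↑n1) (by omega) (le_refl _)
      · by_cases hc2 : i = x1 + ↑n2
        · rw [hc2]; exact T3 (y1 + ↑n1) (by omega) (le_refl _)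
        · have hb := MB3 i h1 (by omega)
          rw [P2 i (y1 + ↑n1) (by omega) (by omega), if_neg (by omega),
            P1 i (y1 + ↑n1) (by omega) (by omega), if_neg (by omega)] at hb
          exact ML4.trans hb
    have T4 : ∀ i : Int, x1 ≤ i → i ≤ x1 + ↑n2 → s4.2 ≤ get2 d i y1 := by
      intro i h1 h2
      by_cases hc : i = x1
      · rw [hc]; exact T1 y1 (le_refl _) (by omega)
      · by_cases hc2 : i = x1 + ↑n2
        · rw [hc2]; exact T3 y1 (le_refl _) (by omega)
        · have hb := MB4 i (by omega) h2
          rw [P3 i y1 (by omega) (by omega), if_neg (by omega),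
            P2 i y1 (by omega) (by omega), if_neg (by omega),
            P1 i y1 (by omega) (by omega), if_neg (by omega)] at hb
          exact hb
    apply le_antisymm
    · rcases border_elim _ _ _ _ _ _ hBmem with ⟨j, h1, h2, he⟩ | ⟨i, h1, h2, he⟩ |
        ⟨j, h1, h2, he⟩ | ⟨i, h1, h2, he⟩
      · rw [he]; exact T1 j h1 h2
      · rw [he]; exact T2 i (by omega) h2
      · rw [he]; exact T3 j h1 (by omega)
      · rw [he]; exact T4 i (by omega) (by omega)
    · have attain : ∃ v ∈ borderB d x1 y1 (x1 + ↑n2) (y1 + ↑n1), s4.2 = v := by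
        rcases MA4 with h4 | ⟨i, hi1, hi2, he⟩
        · rcases MA3 with h3 | ⟨i, hi1, hi2, he⟩
          · rcases MA2 with h2 | ⟨j, hj1, hj2, he⟩
            · rcases MA1 with h1 | ⟨j, hj1, hj2, he⟩
              · rcases min_cases (get2 d x1 (y1 + ↑n1)) (get2 d (x1 + ↑n2) y1) with
                  ⟨he2, _⟩ | ⟨he2, _⟩
                · exact ⟨_, memB_top d x1 y1 _ _ (y1 + ↑n1) (by omega) (le_refl _),
                    by rw [h4, h3, h2, h1, hmn, he2]⟩
                · exact ⟨_, memB_bottom d x1 y1 _ _ y1 (le_refl _) (by omega) (by omega),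
                    by rw [h4, h3, h2, h1, hmn, he2]⟩
              · exact ⟨_, memB_top d x1 y1 _ _ j hj1 (by omega), by rw [h4, h3, h2, he]⟩
            · rw [P1 (x1 + ↑n2) j (by omega) (by omega), if_neg (by omega)] at he
              exact ⟨_, memB_bottom d x1 y1 _ _ j (by omega) hj2 (by omega),
                by rw [h4, h3, he]⟩
          · rw [P2 i (y1 + ↑n1) (by omega) (by omega), if_neg (by omega)] at he
            by_cases hc : i = x1
            · rw [hc, P1 x1 (y1 + ↑n1) (by omega) (by omega), if_pos (by omega)] at he
              exact ⟨_, memB_top d x1 y1 _ _ (y1 + ↑n1 - 1) (by omega) (by omega),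
                by rw [h4, he]⟩
            · rw [P1 i (y1 + ↑n1) (by omega) (by omega), if_neg (by omega)] at he
              exact ⟨_, memB_right d x1 y1 _ _ i (by omega) (by omega) (by omega),
                by rw [h4, he]⟩
        · rw [P3 i y1 (by omega) (by omega), if_neg (by omega)] at he
          by_cases hc : i = x1 + ↑n2
          · rw [hc, P2 (x1 + ↑n2) y1 (by omega) (by omega), if_pos (by omega)] at he
            rw [P1 (x1 + ↑n2) (y1 + 1) (by omega) (by omega), if_neg (by omega)] at he
            exact ⟨_, memB_bottom d x1 y1 _ _ (y1 + 1) (by omega) (by omega) (by omega),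
              by rw [he]⟩
          · rw [P2 i y1 (by omega) (by omega), if_neg (by omega),
              P1 i y1 (by omega) (by omega), if_neg (by omega)] at he
            exact ⟨_, memB_left d x1 y1 _ _ i (by omega) (by omega) (by omega) (by omega),
              by rw [he]⟩
      obtain ⟨v, hvmem, hveq⟩ := attain
      rw [hveq]
      exact hBmin v hvmem

theorem innerfold : ∀ (l : List Int) (acc : List Int) (num : Int),
    l.foldl (fun t _ => (t.1 ++ [t.2], t.2 + 1)) (acc, num)
      = (acc ++ (List.range l.length).map (fun (k : Nat) => num + (k : Int)), num + (l.length : Int)) := by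
  intro l
  induction l with
  | nil => intro acc num; simp
  | cons x t ih =>
    intro acc num
    rw [List.foldl_cons]
    show List.foldl _ (acc ++ [num], num + 1) t = _
    rw [ih, Prod.mk.injEq]
    constructor
    · show acc ++ [num] ++ _ = acc ++ (List.range (t.length + 1)).map (fun (k : Nat) => num + (k : Int))
      rw [List.append_assoc]
      congr 1
      rw [List.range_succ_eq_map]
      simp only [List.map_cons, List.map_map, List.singleton_append, Nat.cast_zero, add_zero,
        List.cons.injEq]
      refine ⟨trivial, List.map_congr_left (fun k _ => ?_)⟩
      simp only [Function.comp]
      push_cast; ring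
    · show num + 1 + (t.length : Int) = num + ((t.length + 1 : Nat) : Int)
      push_cast; ring

theorem outer_step (columns : Int) (p : Int × List (List Int)) :
    (let inner := (PySem.List.pyRange 0 columns 1).foldl
        (fun t _ => (t.1 ++ [t.2], t.2 + 1)) (([0], p.1) : List Int × Int)
     (inner.2, p.2 ++ [inner.1]))
    = (p.1 + (columns.toNat : Int),
       p.2 ++ [[0] ++ (List.range columns.toNat).map (fun (k : Nat) => p.1 + (k : Int))]) := by
  show ((((PySem.List.pyRange 0 columns 1).foldl
        (fun t _ => (t.1 ++ [t.2], t.2 + 1)) (([0], p.1) : List Int × Int))).2,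
      p.2 ++ [((PySem.List.pyRange 0 columns 1).foldl
        (fun t _ => (t.1 ++ [t.2], t.2 + 1)) (([0], p.1) : List Int × Int)).1]) = _
  rw [innerfold]
  have hCL : (PySem.List.pyRange 0 columns 1).length = columns.toNat := by
    rw [PySem.List.length_pyRange_one]; omega
  rw [hCL]

theorem outer_gen (columns : Int) : ∀ (l : List Int) (num : Int) (mat : List (List Int)),
    l.foldl
      (fun s _ =>
        let inner := (PySem.List.pyRange 0 columns 1).foldl
          (fun t _ => (t.1 ++ [t.2], t.2 + 1)) (([0], s.1) : List Int × Int)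
        (inner.2, s.2 ++ [inner.1]))
      ((num, mat) : Int × List (List Int))
    = (num + (l.length : Int) * (columns.toNat : Int),
       mat ++ (List.range l.length).map (fun (r : Nat) =>
         [0] ++ (List.range columns.toNat).map
           (fun (c : Nat) => num + (r : Int) * (columns.toNat : Int) + (c : Int)))) := by
  intro l
  induction l with
  | nil => intro num mat; simp
  | cons x t ih =>
    intro num mat
    rw [List.foldl_cons, outer_step, ih, Prod.mk.injEq]
    constructor
    · show num + (columns.toNat : Int) + _ = _
      simp only [List.length_cons]
      push_cast; ring
    · show mat ++ [[0] ++ (List.range columns.toNat).map (fun (k : Nat) => num + (k : Int))] ++ _ = _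
      rw [List.append_assoc]
      congr 1
      simp only [List.length_cons]
      rw [List.range_succ_eq_map]
      simp only [List.map_cons, List.map_map, List.singleton_append, Nat.cast_zero,
        zero_mul, add_zero, List.cons.injEq]
      refine ⟨trivial, List.map_congr_left (fun k _ => ?_)⟩
      simp only [Function.comp]
      congr 1
      refine List.map_congr_left (fun c _ => ?_)
      push_cast; ring
theorem queryfold (rows columns : Int) {C : Nat} (hcol : columns < (C : Int)) :
    ∀ (qs : List (List Int)) (dmat : List (List Int)) (ans : List Int),
    (∀ q ∈ qs, okQuery rows columns q = true) →
    (∀ r ∈ dmat, r.length = C) → (rows < (dmat.length : Int)) →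
    (qs.foldl
      (fun s i =>
        let r := moveA s.1 (PySem.List.pyGetD i 0 0) (PySem.List.pyGetD i 1 0)
          (PySem.List.pyGetD i 2 0) (PySem.List.pyGetD i 3 0)
        (r.1, s.2 ++ [r.2])) (dmat, ans)).2
    = (qs.foldl
      (fun s i =>
        let r := moveB s.1 (PySem.List.pyGetD i 0 0) (PySem.List.pyGetD i 1 0)
          (PySem.List.pyGetD i 2 0) (PySem.List.pyGetD i 3 0)
        (r.1, s.2 ++ [r.2])) (dmat, ans)).2 := by
  intro qs
  induction qs with
  | nil => intro dmat ans hok hrows hlen; rfl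
  | cons q qs ih =>
    intro dmat ans hok hrows hlen
    rw [List.foldl_cons, List.foldl_cons]
    obtain ⟨hq1, hq2, hq3, hq4, hq5, hq6, hq7⟩ := of_decide_eq_true (hok q (by simp))
    have hmv : moveA dmat (PySem.List.pyGetD q 0 0) (PySem.List.pyGetD q 1 0)
        (PySem.List.pyGetD q 2 0) (PySem.List.pyGetD q 3 0)
        = moveB dmat (PySem.List.pyGetD q 0 0) (PySem.List.pyGetD q 1 0)
        (PySem.List.pyGetD q 2 0) (PySem.List.pyGetD q 3 0) :=
      move_eq dmat _ _ _ _ hrows hq2 hq3 (by omega) hq5 hq6 (by omega)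
    show ((qs.foldl _ ((moveA dmat (PySem.List.pyGetD q 0 0) (PySem.List.pyGetD q 1 0)
        (PySem.List.pyGetD q 2 0) (PySem.List.pyGetD q 3 0)).1,
        ans ++ [(moveA dmat (PySem.List.pyGetD q 0 0) (PySem.List.pyGetD q 1 0)
        (PySem.List.pyGetD q 2 0) (PySem.List.pyGetD q 3 0)).2]))).2 = _
    rw [hmv]
    exact ih _ _ (fun q' hq' => hok q' (List.mem_cons_of_mem _ hq'))
      (moveB_rows _ _ _ _ _ hrows) (by rw [moveB_len]; exact hlen)
theorem build_mat_eq (rows columns : Int) :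
    [PySem.List.pyRepeat [0] (columns + 1)] ++
      (List.range (PySem.List.pyRange 0 rows 1).length).map (fun (r : Nat) =>
        [0] ++ (List.range columns.toNat).map
          (fun (c : Nat) => 1 + (r : Int) * (columns.toNat : Int) + (c : Int)))
    = PySem.List.pyRepeat [0] (columns + 1)
        :: (PySem.List.pyRange 0 rows 1).map (fun r =>
          (0 : Int) :: (PySem.List.pyRange 0 columns 1).map (fun c => r * columns + c + 1)) := by
  rw [List.singleton_append]
  congr 1
  rw [PySem.List.pyRange_zero rows, PySem.List.pyRange_zero columns,
    List.length_map, List.length_range, List.map_map]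
  refine List.map_congr_left (fun r _ => ?_)
  simp only [Function.comp]
  rw [show ((0 : Int) :: List.map (fun c => (r : Int) * columns + c + 1)
      (List.map (fun (k : Nat) => (k : Int)) (List.range columns.toNat)))
    = [(0 : Int)] ++ (List.map ((fun c => (r : Int) * columns + c + 1) ∘ (fun (k : Nat) => (k : Int)))
      (List.range columns.toNat)) from by rw [List.map_map]; rfl]
  congr 1
  refine List.map_congr_left (fun c hc => ?_)
  simp only [Function.comp]
  have hcol : 0 < columns := by
    by_contra hneg
    have : columns.toNat = 0 := by omega
    rw [this] at hc
    simp at hc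
  have : ((columns.toNat : Nat) : Int) = columns := by omega
  rw [this]
  ring

theorem solution_spec_aux (rows columns : Int) (queries : List (List Int))
    (hpre : ∀ q ∈ queries, okQuery rows columns q = true) :
    solution rows columns queries = solution_alt rows columns queries := by
  have hmat : ((PySem.List.pyRange 0 rows 1).foldl
      (fun s _ =>
        let inner := (PySem.List.pyRange 0 columns 1).foldl
          (fun t _ => (t.1 ++ [t.2], t.2 + 1)) (([0], s.1) : List Int × Int)
        (inner.2, s.2 ++ [inner.1]))
      ((1, [PySem.List.pyRepeat [0] (columns + 1)]) : Int × List (List Int))).2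
      = PySem.List.pyRepeat [0] (columns + 1)
        :: (PySem.List.pyRange 0 rows 1).map (fun r =>
          (0 : Int) :: (PySem.List.pyRange 0 columns 1).map (fun c => r * columns + c + 1)) := by
    rw [outer_gen]
    show [PySem.List.pyRepeat [0] (columns + 1)] ++ _ = _
    exact build_mat_eq rows columns
  show (queries.foldl
      (fun s i =>
        let r := moveA s.1 (PySem.List.pyGetD i 0 0) (PySem.List.pyGetD i 1 0)
          (PySem.List.pyGetD i 2 0) (PySem.List.pyGetD i 3 0)
        (r.1, s.2 ++ [r.2]))
      (((PySem.List.pyRange 0 rows 1).foldl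
        (fun s _ =>
          let inner := (PySem.List.pyRange 0 columns 1).foldl
            (fun t _ => (t.1 ++ [t.2], t.2 + 1)) (([0], s.1) : List Int × Int)
          (inner.2, s.2 ++ [inner.1]))
        ((1, [PySem.List.pyRepeat [0] (columns + 1)]) : Int × List (List Int))).2,
       ([] : List Int))).2 = _
  rw [hmat]
  cases queries with
  | nil => rfl
  | cons q qs =>
    obtain ⟨hq1, hq2, hq3, hq4, hq5, hq6, hq7⟩ := of_decide_eq_true (hpre q (by simp))
    have hc2 : 2 ≤ columns := by omega
    have hr2 : 2 ≤ rows := by omega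
    apply queryfold rows columns (C := columns.toNat + 1) (by omega) (q :: qs) _ []
      hpre ?_ ?_
    · intro r hr
      rcases List.mem_cons.1 hr with hr | hr
      · rw [hr, PySem.List.pyRepeat_singleton, List.length_replicate]
        omega
      · obtain ⟨rr, _, hrr⟩ := List.mem_map.1 hr
        rw [← hrr]
        simp only [List.length_cons, List.length_map, PySem.List.length_pyRange_one]
        omega
    · simp only [List.length_cons, List.length_map, PySem.List.length_pyRange_one]
      omega

-- ===== VERDICT (by name: the statement is the Claim_ definition above) =====
theorem solution_spec : Claim_equal_solution := by
  intro rows columns queries hdom hpre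
  show solution rows columns queries = solution_alt rows columns queries
  exact solution_spec_aux rows columns queries hpre
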